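-- pv_equiv track=rewrite | github.com/shymoncev/IPS_SkylineQuery | ADS_Skyline/Linear Speach.py | find_high_risk_data_linear_search
-- ===== SOURCE A (Python) =====
-- def dominates(point1, point2):
--     """
--     point1이 point2를 지배하는지 여부를 판단하는 함수
--     point1이 모든 속성에서 point2보다 크거나 같고, 적어도 하나의 속성에서 작아야 함.
--     :param point1: 데이터 포인트 1 (FPG, OGTT, HbA1c)
--     :param point2: 데이터 포인트 2 (FPG, OGTT, HbA1c)
--     :return: point1이 point2를 지배하면 True, 그렇지 않으면 False
--     """
--     return all(x >= y for x, y in zip(point1, point2)) and any(x > y for x, y in zip(point1, point2))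
--
-- def find_high_risk_data_linear_search(data):
--     """
--     모든 데이터를 비교하여 지배되지 않는 가장 높은 위험도 데이터를 찾는 함수.
--     최종 출력은 서로 비교할 수 없는 가장 높은 위험도 데이터만 포함됨.
--     :param data: 입력 데이터 (공복 혈당, 식후 혈당, HbA1c)
--     :return: 지배되지 않는 높은 위험도 데이터 리스트
--     """
--     high_risk_data = []  # 최종 출력될 리스트
--
--     # 모든 데이터 포인트를 하나씩 탐색
--     for i, point in enumerate(data):
--         is_dominated = False  # 해당 데이터가 지배되는지 여부
--         for j, other_point in enumerate(data):
--             if i != j:  # 자기 자신과는 비교하지 않음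
--                 if dominates(other_point, point):  # 다른 데이터가 현재 데이터를 지배하는지 확인
--                     is_dominated = True
--                     break  # 지배되는 경우, 해당 데이터를 건너뜀
--
--         # 지배되지 않는 데이터만 출력 리스트에 추가
--         if not is_dominated:
--             high_risk_data.append(point)
--
--     return high_risk_data
-- ===== SOURCE B (Python) =====
-- def _beats(p, q):
--     """p dominates q: p >= q coordinatewise (over the common prefix) and p > q somewhere."""
--     pairs = list(zip(p, q))
--     return all(x >= y for x, y in pairs) and any(x > y for x, y in pairs)
--
-- def find_high_risk_data_linear_search(data):
--     # Divide and conquer: split in half, recursively take each half's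
--     # internal survivors, then filter each side's survivors against the
--     # WHOLE other half (sound for the non-transitive truncated-zip relation).
--     def rec(chunk):
--         if len(chunk) <= 1:
--             return list(chunk)
--         mid = len(chunk) // 2
--         left, right = chunk[:mid], chunk[mid:]
--         keep_l = [p for p in rec(left) if not any(_beats(q, p) for q in right)]
--         keep_r = [p for p in rec(right) if not any(_beats(q, p) for q in left)]
--         return keep_l + keep_r
--     return rec(data)
-- ===== Notes on version B (the rewrite author's own statement) =====
-- stated objective: alternative
-- what changed: Replaces A's per-point linear scan over the whole list (nested index loops with early break) by a divide-and-conquer: recursively split the data in half, keep each half's internal survivors, and filter them against the entire other half; soundness needs no transitivity of the truncated-zip domination, so it is exact even for ragged points.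
import Mathlib
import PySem

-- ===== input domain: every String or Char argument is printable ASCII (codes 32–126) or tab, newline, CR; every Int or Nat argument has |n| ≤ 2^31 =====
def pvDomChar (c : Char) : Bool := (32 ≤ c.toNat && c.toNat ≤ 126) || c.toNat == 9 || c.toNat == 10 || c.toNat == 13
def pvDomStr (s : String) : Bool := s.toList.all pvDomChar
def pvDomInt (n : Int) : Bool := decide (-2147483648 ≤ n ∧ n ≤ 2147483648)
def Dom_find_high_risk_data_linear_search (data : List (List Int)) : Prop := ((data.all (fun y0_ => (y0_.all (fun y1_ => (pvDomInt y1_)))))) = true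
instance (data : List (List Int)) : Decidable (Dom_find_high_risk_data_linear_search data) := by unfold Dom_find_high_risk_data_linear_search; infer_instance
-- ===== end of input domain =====

-- B replaces A's per-point scan of the whole list (nested loops with early break) by a
-- divide-and-conquer: recursive halving, each half's internal survivors filtered against
-- the entire other half; same output, objective: alternative (same asymptotic cost).

-- ===== PORT A =====
-- dominates(point1, point2): all(x >= y) and any(x > y) over zip(point1, point2)
def pyDominates (p q : List Int) : Bool :=
  ((p.zip q).all (fun xy => decide (xy.2 ≤ xy.1))) &&
  ((p.zip q).any (fun xy => decide (xy.2 < xy.1)))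

-- the inner 'for j, other_point in enumerate(data): … break' loop of A
def innerA (i : Int) (point : List Int) : List (Int × List Int) → Bool
  | [] => false
  | (j, other) :: rest =>
      if i ≠ j then
        (if pyDominates other point then true else innerA i point rest)
      else innerA i point rest

def find_high_risk_data_linear_search (data : List (List Int)) : List (List Int) :=
  (PySem.List.enumerate data).foldl
    (fun acc ip =>
      if innerA ip.1 ip.2 (PySem.List.enumerate data) then acc else acc ++ [ip.2]) []

-- ===== PORT B =====
-- _beats(p, q): all(x >= y) and any(x > y) over zip(p, q)
def altBeats (p q : List Int) : Bool :=
  ((p.zip q).all (fun xy => decide (xy.2 ≤ xy.1))) &&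
  ((p.zip q).any (fun xy => decide (xy.2 < xy.1)))

-- rec(chunk): split in half, keep each half's internal survivors, filter against the other half
def altRec (chunk : List (List Int)) : List (List Int) :=
  if chunk.length ≤ 1 then chunk
  else
    ((altRec (chunk.take (chunk.length / 2))).filter
        (fun p => !((chunk.drop (chunk.length / 2)).any (fun q => altBeats q p)))) ++
    ((altRec (chunk.drop (chunk.length / 2))).filter
        (fun p => !((chunk.take (chunk.length / 2)).any (fun q => altBeats q p))))
termination_by chunk.length
decreasing_by
  · simp; omega
  · simp; omega

def find_high_risk_data_linear_search_alt (data : List (List Int)) : List (List Int) :=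
  altRec data

-- ===== PRECONDITION & SPEC =====
def Spec_find_high_risk_data_linear_search (data : List (List Int)) (out : List (List Int)) : Prop := out = find_high_risk_data_linear_search_alt data
instance (data : List (List Int)) (out : List (List Int)) : Decidable (Spec_find_high_risk_data_linear_search data out) := by unfold Spec_find_high_risk_data_linear_search; infer_instance

-- ===== CLAIM (what is proved, stated in full; the proofs are below) =====
def Claim_equal_find_high_risk_data_linear_search : Prop := ∀ (data : List (List Int)), Dom_find_high_risk_data_linear_search data → Spec_find_high_risk_data_linear_search data (find_high_risk_data_linear_search data)

-- ===== LEMMAS AND PROOFS =====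

theorem beats_self (p : List Int) : altBeats p p = false := by
  unfold altBeats
  have h : (p.zip p).any (fun xy => decide (xy.2 < xy.1)) = false := by
    induction p with
    | nil => rfl
    | cons x t ih => simp [ih]
  simp [h]

-- B's recursion computes the global non-dominated filter
theorem altRec_eq (l : List (List Int)) :
    altRec l = l.filter (fun p => !(l.any (fun q => altBeats q p))) := by
  induction l using altRec.induct with
  | case1 l h =>
      rw [altRec, if_pos h]
      cases l with
      | nil => rfl
      | cons p t =>
          have ht : t = [] := by
            cases t with
            | nil => rfl
            | cons a b => simp at h
          subst ht
          simp [beats_self]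
  | case2 l h ih1 ih2 =>
      rw [altRec, if_neg h]
      rw [ih1, ih2]
      have hsplit : l.take (l.length / 2) ++ l.drop (l.length / 2) = l :=
        List.take_append_drop (l.length / 2) l
      conv_rhs => rw [← hsplit]
      rw [List.filter_append]
      congr 1
      · rw [List.filter_filter]
        apply List.filter_congr
        intro p _
        rw [List.any_append, Bool.not_or, Bool.and_comm]
      · rw [List.filter_filter]
        apply List.filter_congr
        intro p _
        rw [List.any_append, Bool.not_or]

theorem pyDominates_self (p : List Int) : pyDominates p p = false := beats_self p

theorem innerA_eq_any (i : Int) (pt : List Int) (l : List (Int × List Int)) :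
    innerA i pt l = l.any (fun jp => decide (i ≠ jp.1) && pyDominates jp.2 pt) := by
  induction l with
  | nil => rfl
  | cons jp t ih =>
      obtain ⟨j, other⟩ := jp
      simp only [innerA, List.any_cons, ih]
      by_cases hij : i ≠ j
      · cases h : pyDominates other pt <;> simp [hij]
      · simp [hij]

-- two enumerate pairs with the same index carry the same element
theorem enumerate_snd_unique {α : Type} (l : List α) (s : Int) (ip jp : Int × α)
    (hi : ip ∈ PySem.List.enumerate l s) (hj : jp ∈ PySem.List.enumerate l s)
    (hij : ip.1 = jp.1) : ip.2 = jp.2 := by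
  rw [PySem.List.mem_enumerate_iff] at hi hj
  obtain ⟨k, hk, rfl⟩ := hi
  obtain ⟨k', hk', rfl⟩ := hj
  have hkk : k = k' := by simp at hij; omega
  subst hkk
  rfl

-- the i ≠ j guard is vacuous: the point never dominates itself
theorem any_idx_eq (data : List (List Int)) (ip : Int × List Int)
    (hip : ip ∈ PySem.List.enumerate data) :
    (PySem.List.enumerate data).any
        (fun jp => decide (ip.1 ≠ jp.1) && pyDominates jp.2 ip.2)
      = data.any (fun q => pyDominates q ip.2) := by
  apply Bool.eq_iff_iff.mpr
  simp only [List.any_eq_true, Bool.and_eq_true, decide_eq_true_eq]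
  constructor
  · rintro ⟨jp, hjp, -, hd⟩
    rw [PySem.List.mem_enumerate_iff] at hjp
    obtain ⟨k, hk, rfl⟩ := hjp
    exact ⟨data[k], List.getElem_mem hk, hd⟩
  · rintro ⟨q, hq, hd⟩
    obtain ⟨k, hk, rfl⟩ := List.mem_iff_getElem.mp hq
    have hjm : ((0 : Int) + k, data[k]) ∈ PySem.List.enumerate data := by
      rw [PySem.List.mem_enumerate_iff]
      exact ⟨k, hk, rfl⟩
    refine ⟨((0 : Int) + k, data[k]), hjm, ?_, hd⟩
    intro hEq
    have h2 : ip.2 = data[k] := enumerate_snd_unique data 0 ip _ hip hjm hEq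
    rw [h2] at hd
    rw [pyDominates_self] at hd
    exact Bool.false_ne_true hd

theorem filter_map_snd_enumerate (h : List Int → Bool) (l : List (List Int)) (s : Int) :
    (((PySem.List.enumerate l s).filter (fun ip => h ip.2)).map (fun ip => ip.2))
      = l.filter h := by
  induction l generalizing s with
  | nil => simp [PySem.List.enumerate_nil]
  | cons q qs ih =>
      rw [PySem.List.enumerate_cons]
      rw [List.filter_cons]
      cases hx : h q <;> simp [hx, ih]

-- ===== VERDICT (by name: the statement is the Claim_ definition above) =====
theorem find_high_risk_data_linear_search_spec : Claim_equal_find_high_risk_data_linear_search := by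
  intro data _
  unfold Spec_find_high_risk_data_linear_search
  unfold find_high_risk_data_linear_search find_high_risk_data_linear_search_alt
  rw [altRec_eq]
  rw [show (fun (acc : List (List Int)) (ip : Int × List Int) =>
        if innerA ip.1 ip.2 (PySem.List.enumerate data) then acc else acc ++ [ip.2])
      = (fun acc ip =>
        if (!innerA ip.1 ip.2 (PySem.List.enumerate data)) = true
          then acc ++ [ip.2] else acc) by
      funext acc ip
      cases h : innerA ip.1 ip.2 (PySem.List.enumerate data) <;> simp]
  rw [PySem.List.foldl_append_if
      (fun ip => !innerA ip.1 ip.2 (PySem.List.enumerate data))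
      (fun ip => ip.2) (PySem.List.enumerate data) []]
  have hcong : ∀ ip ∈ PySem.List.enumerate data,
      (!innerA ip.1 ip.2 (PySem.List.enumerate data))
        = (!(data.any (fun q => pyDominates q ip.2))) := by
    intro ip hip
    rw [innerA_eq_any, any_idx_eq data ip hip]
  rw [List.filter_congr hcong]
  rw [List.nil_append]
  rw [filter_map_snd_enumerate (fun p => !(data.any (fun q => pyDominates q p))) data 0]
  rfl
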